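-- pv_equiv track=rewrite | github.com/hot666666/RL-Tetris | rl_tetris/features/extractors.py | _count_wells
-- ===== SOURCE A (Python) =====
-- from typing import List, Tuple
--
-- def _count_wells(column_heights: List[int]) -> int:
--     """
--     Count wells (columns significantly lower than neighbors).
--
--     Args:
--         column_heights: List of column heights
--
--     Returns:
--         Number of wells
--     """
--     if len(column_heights) < 2:
--         return 0
--
--     wells = 0
--     for i, height in enumerate(column_heights):
--         left_higher = i == 0 or column_heights[i - 1] > height
--         right_higher = i == len(column_heights) - 1 or column_heights[i + 1] > height
--
--         if left_higher and right_higher: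
--             wells += 1
--
--     return wells
-- ===== SOURCE B (Python) =====
-- def _count_wells(column_heights):
--     if len(column_heights) < 2:
--         return 0
--     diffs = [b - a for a, b in zip(column_heights, column_heights[1:])]
--     wells = (1 if diffs[0] > 0 else 0) + (1 if diffs[-1] < 0 else 0)
--     for x, y in zip(diffs, diffs[1:]):
--         if x < 0 and y > 0:
--             wells += 1
--     return wells
-- ===== Notes on version B (the rewrite author's own statement) =====
-- stated objective: alternative
-- what changed: B first builds the adjacent-difference array and counts wells by scanning sign patterns of consecutive differences (first: d[0]>0, last: d[-1]<0, interior: d[i-1]<0 and d[i]>0) instead of A's per-index neighbor comparisons with boundary disjunctions.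
import Mathlib
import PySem

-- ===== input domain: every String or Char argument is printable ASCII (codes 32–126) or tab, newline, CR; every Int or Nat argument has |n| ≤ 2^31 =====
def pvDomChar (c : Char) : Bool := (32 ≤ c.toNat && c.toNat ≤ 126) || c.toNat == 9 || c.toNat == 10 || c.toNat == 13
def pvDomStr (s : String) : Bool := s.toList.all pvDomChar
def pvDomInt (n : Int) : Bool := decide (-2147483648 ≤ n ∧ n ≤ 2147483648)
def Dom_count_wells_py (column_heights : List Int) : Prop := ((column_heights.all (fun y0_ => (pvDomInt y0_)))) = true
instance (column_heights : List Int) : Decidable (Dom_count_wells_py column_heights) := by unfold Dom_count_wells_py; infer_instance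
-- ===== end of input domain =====

-- B replaces A's per-index neighbor comparisons by a scan over the adjacent-difference array
-- (objective: alternative decomposition, same O(n) cost).

-- ===== PORT A =====
-- literal port of A: enumerate loop; the pyGetD defaults are never used (indices are guarded in range)
def count_wells_py (column_heights : List Int) : Int :=
  if column_heights.length < 2 then 0
  else
    (PySem.List.enumerate column_heights 0).foldl
      (fun wells p =>
        let left_higher := p.1 == 0 ||
          decide (PySem.List.pyGetD column_heights (p.1 - 1) 0 > p.2)
        let right_higher := p.1 == (column_heights.length : Int) - 1 ||
          decide (PySem.List.pyGetD column_heights (p.1 + 1) 0 > p.2)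
        if left_higher && right_higher then wells + 1 else wells) 0

-- ===== PORT B =====
-- literal port of B: diffs = [b - a for a, b in zip(h, h[1:])]; the pyGetD defaults are never used
def count_wells_py_alt (column_heights : List Int) : Int :=
  if column_heights.length < 2 then 0
  else
    let diffs := List.zipWith (fun a b => b - a) column_heights
      (PySem.List.slice column_heights (some 1) none)
    let wells : Int :=
      (if PySem.List.pyGetD diffs 0 0 > 0 then 1 else 0) +
      (if PySem.List.pyGetD diffs (-1) 0 < 0 then 1 else 0)
    (List.zip diffs (PySem.List.slice diffs (some 1) none)).foldl
      (fun acc xy => if xy.1 < 0 ∧ 0 < xy.2 then acc + 1 else acc) wells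

-- ===== PRECONDITION & SPEC =====
def Spec_count_wells_py (column_heights : List Int) (out : Int) : Prop := out = count_wells_py_alt column_heights
instance (column_heights : List Int) (out : Int) : Decidable (Spec_count_wells_py column_heights out) := by unfold Spec_count_wells_py; infer_instance

-- ===== CLAIM (what is proved, stated in full; the proofs are below) =====
def Claim_equal_count_wells_py : Prop := ∀ (column_heights : List Int), Dom_count_wells_py column_heights → Spec_count_wells_py column_heights (count_wells_py column_heights)

-- ===== LEMMAS AND PROOFS =====

-- reference count over the difference list: ind(d0<0 ∧ d1>0) per adjacent pair, plus ind(last<0)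
def cntB : List Int → Int
  | [] => 0
  | [x] => if x < 0 then 1 else 0
  | x :: y :: t => (if x < 0 ∧ 0 < y then 1 else 0) + cntB (y :: t)

-- reference count for A's loop over a suffix, prev = height of the column just left of the suffix
def wA : Int → List Int → Int
  | _, [] => 0
  | prev, [x] => if prev > x then 1 else 0
  | prev, x :: y :: t => (if prev > x ∧ y > x then 1 else 0) + wA x (y :: t)

-- last element of x :: t
def lastOf : Int → List Int → Int
  | x, [] => x
  | _, y :: t => lastOf y t

lemma lastOf_getElem (t : List Int) : ∀ x : Int, (x :: t)[t.length]'(by simp) = lastOf x t := by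
  induction t with
  | nil => intro x; rfl
  | cons y t' ih => intro x; simpa [lastOf] using ih y

lemma pyGetD_neg_one_lastOf (x : Int) (t : List Int) :
    PySem.List.pyGetD (x :: t) (-1) 0 = lastOf x t := by
  have h := PySem.List.pyGetD_neg_natCast (xs := x :: t) (d := 0) (k := 1)
    (by omega) (by simp)
  norm_num at h
  rw [h]
  simpa using lastOf_getElem t x

-- B's zip-fold plus the last-difference indicator is cntB
lemma blast (t : List Int) : ∀ (x c : Int),
    (List.zip (x :: t) t).foldl
      (fun acc xy => if xy.1 < 0 ∧ 0 < xy.2 then acc + 1 else acc) c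
      + (if lastOf x t < 0 then (1 : Int) else 0) = c + cntB (x :: t) := by
  induction t with
  | nil => intro x c; simp [lastOf, cntB]
  | cons y t' ih =>
      intro x c
      have := ih y (if x < 0 ∧ 0 < y then c + 1 else c)
      simp only [List.zip_cons_cons, List.foldl_cons, lastOf, cntB] at *
      exact this.trans (by split_ifs <;> ring)

-- A's local-minimum count equals cntB of the difference list
lemma bridge (t : List Int) : ∀ (prev x : Int),
    wA prev (x :: t) =
      cntB ((x - prev) :: List.zipWith (fun a b => b - a) (x :: t) t) := by
  induction t with
  | nil =>
      intro prev x
      simp only [List.zipWith, wA, cntB]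
      split_ifs <;> omega
  | cons y t' ih =>
      intro prev x
      simp only [List.zipWith, wA, cntB]
      rw [← ih x y]
      congr 1
      split_ifs <;> omega

lemma drop_succ_of_drop {h t : List Int} {x : Int} {k : Nat}
    (hd : h.drop k = x :: t) : h.drop (k + 1) = t := by
  have : h.drop (k + 1) = (h.drop k).drop 1 := by
    rw [List.drop_drop]
  simp [this, hd]

lemma getD_of_drop {h t : List Int} {x : Int} {k : Nat}
    (hd : h.drop k = x :: t) : h.getD k 0 = x := by
  have h1 : h[k]? = some x := by
    have h2 : (h.drop k)[0]? = h[k + 0]? := List.getElem?_drop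
    rw [hd] at h2
    simpa using h2.symm
  simp [List.getD_eq_getElem?_getD, h1]

lemma len_gt_of_drop {h t : List Int} {x : Int} {k : Nat}
    (hd : h.drop k = x :: t) : k < h.length := by
  by_contra hc
  have hnil : h.drop k = [] := List.drop_eq_nil_of_le (by omega)
  rw [hnil] at hd
  exact (List.cons_ne_nil x t hd.symm).elim

-- the length of the suffix determines h.length
lemma len_eq_of_drop {h t : List Int} {k : Nat}
    (hk : k ≤ h.length) (hd : h.drop k = t) : h.length = k + t.length := by
  have := List.length_drop (l := h) (i := k)
  rw [hd] at this
  omega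

-- A's enumerate-fold over the suffix starting at k ≥ 1 computes wA
lemma Aside (h : List Int) (t : List Int) : ∀ (k : Nat) (c : Int), 0 < k → h.drop k = t →
    (PySem.List.enumerate t (k : Int)).foldl
      (fun wells p =>
        if ((p.1 == 0 ||
            decide (PySem.List.pyGetD h (p.1 - 1) 0 > p.2)) &&
           (p.1 == (h.length : Int) - 1 ||
            decide (PySem.List.pyGetD h (p.1 + 1) 0 > p.2)))
        then wells + 1 else wells) c
    = c + wA (h.getD (k - 1) 0) t := by
  induction t with
  | nil => intro k c _ _; simp [PySem.List.enumerate_nil, wA]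
  | cons x t' ih =>
      intro k c hk hd
      have hkl : k < h.length := len_gt_of_drop hd
      have hx : h.getD k 0 = x := getD_of_drop hd
      have hd' : h.drop (k + 1) = t' := drop_succ_of_drop hd
      have hne : ((k : Int) == 0) = false := by
        simp; omega
      have hleft : PySem.List.pyGetD h ((k : Int) - 1) 0 = h.getD (k - 1) 0 := by
        have : ((k : Int) - 1) = ((k - 1 : Nat) : Int) := by omega
        rw [this, PySem.List.pyGetD_natCast]
      rw [PySem.List.enumerate_cons, List.foldl_cons]
      cases t' with
      | nil =>
          have hlen : h.length = k + 1 := len_eq_of_drop (by omega) hd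
          have hr : ((k : Int) == (h.length : Int) - 1) = true := by
            simp; omega
          rw [PySem.List.enumerate_nil, List.foldl_nil]
          simp only [hne, hr, hleft, Bool.false_or, Bool.true_or, Bool.and_true,
            decide_eq_true_eq, wA]
          split_ifs <;> ring
      | cons y t'' =>
          have hy : h.getD (k + 1) 0 = y := getD_of_drop hd'
          have hlen : h.length = k + (t''.length + 2) := len_eq_of_drop (by omega) hd
          have hr : ((k : Int) == (h.length : Int) - 1) = false := by
            simp; omega
          have hright : PySem.List.pyGetD h ((k : Int) + 1) 0 = y := by
            have : ((k : Int) + 1) = ((k + 1 : Nat) : Int) := by omega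
            rw [this, PySem.List.pyGetD_natCast, hy]
          have hih := ih (k + 1)
            (if (((k : Int) == 0 || decide (PySem.List.pyGetD h ((k : Int) - 1) 0 > x)) &&
                 ((k : Int) == (h.length : Int) - 1 ||
                   decide (PySem.List.pyGetD h ((k : Int) + 1) 0 > x))) = true
             then c + 1 else c)
            (by omega) hd'
          simp only [Nat.add_sub_cancel, hx] at hih
          have hcast : ((k : Int) + 1) = ((k + 1 : Nat) : Int) := by omega
          rw [hcast]
          refine hih.trans ?_
          simp only [hne, hr, hleft, hright, Bool.false_or, Bool.and_eq_true,
            decide_eq_true_eq, wA]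
          split_ifs <;> ring

theorem count_wells_py_spec : Claim_equal_count_wells_py := by
  intro h _
  unfold Spec_count_wells_py
  match h with
  | [] => rfl
  | [a] => rfl
  | a :: b :: t =>
    have h2 : ¬ ((a :: b :: t).length < 2) := by simp
    unfold count_wells_py count_wells_py_alt
    rw [if_neg h2, if_neg h2]
    -- A side
    rw [PySem.List.enumerate_cons, List.foldl_cons]
    have hr0 : ((0 : Int) == ((a :: b :: t).length : Int) - 1) = false := by
      simp
      omega
    have hb1 : PySem.List.pyGetD (a :: b :: t) ((0 : Int) + 1) 0 = b := by
      norm_num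
      rw [show (1 : Int) = ((1 : Nat) : Int) by norm_num, PySem.List.pyGetD_natCast]
      rfl
    have hA := Aside (a :: b :: t) (b :: t) 1
      (if (((0 : Int) == 0 || decide (PySem.List.pyGetD (a :: b :: t) ((0 : Int) - 1) 0 > a)) &&
           ((0 : Int) == ((a :: b :: t).length : Int) - 1 ||
             decide (PySem.List.pyGetD (a :: b :: t) ((0 : Int) + 1) 0 > a))) = true
       then (0 : Int) + 1 else 0)
      (by omega) rfl
    rw [show ((1 : Nat) : Int) = (0 : Int) + 1 by norm_num] at hA
    refine hA.trans ?_
    -- B side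
    have hd0 : PySem.List.pyGetD ((b - a) :: List.zipWith (fun a b => b - a) (b :: t) t) 0 0
        = b - a := by
      rw [show (0 : Int) = ((0 : Nat) : Int) by norm_num, PySem.List.pyGetD_natCast]
      rfl
    simp only [PySem.List.slice_from_one, List.tail_cons, List.zipWith_cons_cons,
      pyGetD_neg_one_lastOf, hd0, hb1, hr0]
    have hB := blast (List.zipWith (fun a b => b - a) (b :: t) t) (b - a)
      ((if b - a > 0 then (1 : Int) else 0) +
       (if lastOf (b - a) (List.zipWith (fun a b => b - a) (b :: t) t) < 0
        then (1 : Int) else 0))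
    rw [eq_comm]
    refine (eq_sub_of_add_eq hB).trans ?_
    rw [show (List.getD (a :: b :: t) (1 - 1) 0) = a from rfl]
    rw [bridge t a b]
    simp only [Bool.false_or, BEq.rfl, Bool.true_or, Bool.true_and, decide_eq_true_eq]
    have hco : (if b > a then ((0 : Int) + 1) else 0) = (if b - a > 0 then (1 : Int) else 0) := by
      split_ifs <;> omega
    rw [hco]
    ring
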